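-- pv_equiv track=rewrite | github.com/8Michelle/technosphere | ir/hw_boolean_search/simple9.py | encode_batch
-- ===== SOURCE A (Python) =====
-- size_code = {
--     1: 1,
--     2: 2,
--     3: 3,
--     4: 4,
--     5: 5,
--     7: 6,
--     9: 8,
--     14: 10,
--     28: 11
-- }
--
-- def encode_batch(batch, size):
--     code = size_code[size]
--     buffer = 0
--     for ind, item in enumerate(batch[::-1]):
--         buffer = item << (ind * size) | buffer
--     buffer = buffer << (28 - len(batch) * size)
--     buffer = code << ((ind + 1) * size + (28 - len(batch) * size)) | buffer
--
--     return buffer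
-- ===== SOURCE B (Python) =====
-- size_code = {
--     1: 1,
--     2: 2,
--     3: 3,
--     4: 4,
--     5: 5,
--     7: 6,
--     9: 8,
--     14: 10,
--     28: 11
-- }
--
-- def encode_batch(batch, size):
--     code = size_code[size]
--     buffer = 0
--     for item in batch:
--         buffer = buffer << size | item
--     buffer = buffer << (28 - len(batch) * size)
--     return code << 28 | buffer
-- ===== Notes on version B (the rewrite author's own statement) =====
-- stated objective: simpler
-- what changed: B builds the codeword with a forward Horner-style accumulator (buffer = buffer << size | item over the batch in order) and ORs the selector in at the fixed offset 28, instead of A's reversing the list, enumerating it, and placing each item at an explicit ind*size offset with the selector shift recomputed from leftover loop state.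
import Mathlib
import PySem

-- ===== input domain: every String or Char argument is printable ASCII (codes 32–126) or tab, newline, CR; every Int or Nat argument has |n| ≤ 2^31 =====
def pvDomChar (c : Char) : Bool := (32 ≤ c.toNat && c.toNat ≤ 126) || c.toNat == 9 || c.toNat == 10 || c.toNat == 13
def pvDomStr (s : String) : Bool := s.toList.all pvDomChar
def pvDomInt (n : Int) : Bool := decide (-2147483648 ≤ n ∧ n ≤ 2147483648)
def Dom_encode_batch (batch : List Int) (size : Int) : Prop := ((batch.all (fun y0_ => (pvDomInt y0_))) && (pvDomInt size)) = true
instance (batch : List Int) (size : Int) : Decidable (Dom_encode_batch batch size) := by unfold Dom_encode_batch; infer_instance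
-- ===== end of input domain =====

-- B replaces A's reverse+enumerate placement (item << ind*size) by a forward Horner
-- accumulator (buffer << size | item) and ORs the selector in at the fixed offset 28 (simpler).

-- ===== PORT A =====
def size_code : PySem.Dict Int Int :=
  PySem.Dict.ofList [(1,1),(2,2),(3,3),(4,4),(5,5),(7,6),(9,8),(14,10),(28,11)]

def encode_batch (batch : List Int) (size : Int) : Int :=
  -- code = size_code[size]  (KeyError outside Pre_, where the .getD 0 default is never read)
  let code := (PySem.Dict.get? size_code size).getD 0
  -- batch[::-1]
  let rev := (PySem.List.slice? batch none none (-1)).getD []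
  -- for ind, item in enumerate(batch[::-1]): buffer = item << (ind * size) | buffer
  -- (shift amounts are nonnegative under Pre_, where .toNat is exact; Python raises on negative shifts)
  let buffer :=
    (PySem.List.enumerate rev 0).foldl
      (fun (buffer : Int) (p : Int × Int) => PySem.Int.bor (p.2 <<< (p.1 * size).toNat) buffer) 0
  let buffer := buffer <<< (28 - (batch.length : Int) * size).toNat
  -- after the loop the Python variable ind holds len(batch) - 1 (on an empty batch it is
  -- unbound and Python raises UnboundLocalError; Pre_ requires batch ≠ [])
  let ind : Int := (batch.length : Int) - 1
  PySem.Int.bor (code <<< ((ind + 1) * size + (28 - (batch.length : Int) * size)).toNat) buffer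

-- ===== PORT B =====
def encode_batch_alt (batch : List Int) (size : Int) : Int :=
  let code := (PySem.Dict.get? size_code size).getD 0
  -- for item in batch: buffer = buffer << size | item   (size ≥ 0 under Pre_, .toNat exact)
  let buffer := batch.foldl (fun (buffer item : Int) => PySem.Int.bor (buffer <<< size.toNat) item) 0
  let buffer := buffer <<< (28 - (batch.length : Int) * size).toNat
  PySem.Int.bor (code <<< (28 : ℕ)) buffer

-- ===== PRECONDITION & SPEC =====
-- Pre_ = exactly where Python A returns: size a key of size_code (else KeyError), batch
-- nonempty (else the loop variable ind is unbound: UnboundLocalError), and the final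
-- alignment shift 28 - len(batch)*size nonnegative (else ValueError on a negative shift).
def Pre_encode_batch (batch : List Int) (size : Int) : Prop :=
  size ∈ ([1, 2, 3, 4, 5, 7, 9, 14, 28] : List Int) ∧ batch ≠ [] ∧
    (batch.length : Int) * size ≤ 28
instance (batch : List Int) (size : Int) : Decidable (Pre_encode_batch batch size) := by
  unfold Pre_encode_batch; infer_instance

def pvWitness_encode_batch : List Int × Int := ([5, 2], 14)

def Spec_encode_batch (batch : List Int) (size : Int) (out : Int) : Prop :=
  out = encode_batch_alt batch size
instance (batch : List Int) (size : Int) (out : Int) : Decidable (Spec_encode_batch batch size out) := by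
  unfold Spec_encode_batch; infer_instance

-- ===== CLAIM (what is proved, stated in full; the proofs are below) =====
def Claim_equal_encode_batch : Prop := ∀ (batch : List Int) (size : Int),
  Dom_encode_batch batch size → Pre_encode_batch batch size →
    Spec_encode_batch batch size (encode_batch batch size)

-- ===== LEMMAS AND PROOFS =====

-- Nat bit-level facts
lemma nat_zero_ldiff (m : ℕ) : Nat.ldiff 0 m = 0 := by
  apply Nat.eq_of_testBit_eq
  intro i
  simp [Nat.testBit_ldiff]

-- the subtraction form appearing in PySem.Int.bor's mixed-sign branches is Nat.ldiff
lemma nat_sub_and_eq_ldiff (n m : ℕ) : n - (n &&& m) = Nat.ldiff n m := by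
  induction n using Nat.binaryRec generalizing m with
  | zero => simp [nat_zero_ldiff]
  | bit b n ih =>
    induction m using Nat.bitCasesOn with
    | bit c m =>
      rw [Nat.land_bit, Nat.ldiff_bit, ← ih m]
      have hle : n &&& m ≤ n := Nat.and_le_left
      cases b <;> cases c <;> simp [Nat.bit] <;> omega

-- structural equations of PySem.Int.bor
lemma bor_ofNat_ofNat (m n : ℕ) :
    PySem.Int.bor (Int.ofNat m) (Int.ofNat n) = Int.ofNat (m ||| n) := by
  unfold PySem.Int.bor
  simp [Int.ofNat_eq_natCast]

lemma bor_ofNat_negSucc (m n : ℕ) :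
    PySem.Int.bor (Int.ofNat m) (Int.negSucc n) = Int.negSucc (Nat.ldiff n m) := by
  unfold PySem.Int.bor
  have h1 : ¬ (0:Int) ≤ Int.negSucc n := by simp [Int.negSucc_eq]; omega
  have h2 : (0:Int) ≤ Int.ofNat m := by simp [Int.ofNat_eq_natCast]
  rw [if_pos h2, if_neg h1]
  have h3 : (-(Int.negSucc n) - 1) = (n : Int) := by simp [Int.negSucc_eq]
  rw [h3, ← nat_sub_and_eq_ldiff]
  simp [Int.negSucc_eq, Int.ofNat_eq_natCast]
  omega

lemma bor_negSucc_ofNat (m n : ℕ) :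
    PySem.Int.bor (Int.negSucc m) (Int.ofNat n) = Int.negSucc (Nat.ldiff m n) := by
  unfold PySem.Int.bor
  have h1 : ¬ (0:Int) ≤ Int.negSucc m := by simp [Int.negSucc_eq]; omega
  have h2 : (0:Int) ≤ Int.ofNat n := by simp [Int.ofNat_eq_natCast]
  rw [if_neg h1, if_pos h2]
  have h3 : (-(Int.negSucc m) - 1) = (m : Int) := by simp [Int.negSucc_eq]
  rw [h3, ← nat_sub_and_eq_ldiff]
  simp [Int.negSucc_eq, Int.ofNat_eq_natCast]
  omega

lemma bor_negSucc_negSucc (m n : ℕ) :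
    PySem.Int.bor (Int.negSucc m) (Int.negSucc n) = Int.negSucc (m &&& n) := by
  unfold PySem.Int.bor
  have h1 : ¬ (0:Int) ≤ Int.negSucc m := by simp [Int.negSucc_eq]; omega
  have h2 : ¬ (0:Int) ≤ Int.negSucc n := by simp [Int.negSucc_eq]; omega
  rw [if_neg h1, if_neg h2]
  have h3 : (-(Int.negSucc m) - 1) = (m : Int) := by simp [Int.negSucc_eq]
  have h4 : (-(Int.negSucc n) - 1) = (n : Int) := by simp [Int.negSucc_eq]
  rw [h3, h4]
  simp [Int.negSucc_eq]
  omega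

lemma bor_assoc (a b c : Int) :
    PySem.Int.bor (PySem.Int.bor a b) c = PySem.Int.bor a (PySem.Int.bor b c) := by
  rcases a with m|m <;> rcases b with n|n <;> rcases c with p|p <;>
    simp only [bor_ofNat_ofNat, bor_ofNat_negSucc, bor_negSucc_ofNat, bor_negSucc_negSucc,
      Int.ofNat.injEq, Int.negSucc.injEq] <;>
    · apply Nat.eq_of_testBit_eq
      intro i
      simp only [Nat.testBit_lor, Nat.testBit_land, Nat.testBit_ldiff]
      cases Nat.testBit m i <;> cases Nat.testBit n i <;> cases Nat.testBit p i <;> rfl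

lemma zero_bor (a : Int) : PySem.Int.bor 0 a = a := by
  rw [PySem.Int.bor_comm, PySem.Int.bor_zero]

lemma bor_left_comm (a b c : Int) :
    PySem.Int.bor a (PySem.Int.bor b c) = PySem.Int.bor b (PySem.Int.bor a c) := by
  rw [← bor_assoc, PySem.Int.bor_comm a b, bor_assoc]

-- shifting (= multiplying by a power of two) distributes over bor
lemma two_mul_negSucc (k : ℕ) : 2 * Int.negSucc k = Int.negSucc (2 * k + 1) := by
  rw [Int.negSucc_eq, Int.negSucc_eq]; push_cast; ring

lemma two_mul_ofNat (k : ℕ) : 2 * Int.ofNat k = Int.ofNat (2 * k) := by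
  rw [Int.ofNat_eq_natCast, Int.ofNat_eq_natCast]; push_cast; ring

lemma bor_two_mul (x y : Int) :
    PySem.Int.bor (2 * x) (2 * y) = 2 * PySem.Int.bor x y := by
  rcases x with m|m <;> rcases y with n|n
  · rw [two_mul_ofNat, two_mul_ofNat, bor_ofNat_ofNat, bor_ofNat_ofNat, two_mul_ofNat]
    congr 1
    have h := Nat.lor_bit false m false n
    simpa [Nat.bit] using h
  · rw [two_mul_ofNat, two_mul_negSucc, bor_ofNat_negSucc, bor_ofNat_negSucc, two_mul_negSucc]
    congr 1
    have h := Nat.ldiff_bit true n false m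
    simpa [Nat.bit] using h
  · rw [two_mul_negSucc, two_mul_ofNat, bor_negSucc_ofNat, bor_negSucc_ofNat, two_mul_negSucc]
    congr 1
    have h := Nat.ldiff_bit true m false n
    simpa [Nat.bit] using h
  · rw [two_mul_negSucc, two_mul_negSucc, bor_negSucc_negSucc, bor_negSucc_negSucc,
      two_mul_negSucc]
    congr 1
    have h := Nat.land_bit true m true n
    simpa [Nat.bit] using h

lemma bor_mul_pow (x y : Int) (k : ℕ) :
    PySem.Int.bor x y * 2 ^ k = PySem.Int.bor (x * 2 ^ k) (y * 2 ^ k) := by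
  induction k with
  | zero => simp
  | succ k ih =>
    have h2 : PySem.Int.bor (2 * (x * 2 ^ k)) (2 * (y * 2 ^ k))
        = 2 * PySem.Int.bor (x * 2 ^ k) (y * 2 ^ k) := bor_two_mul _ _
    calc PySem.Int.bor x y * 2 ^ (k + 1)
        = 2 * (PySem.Int.bor x y * 2 ^ k) := by ring
      _ = 2 * PySem.Int.bor (x * 2 ^ k) (y * 2 ^ k) := by rw [ih]
      _ = PySem.Int.bor (2 * (x * 2 ^ k)) (2 * (y * 2 ^ k)) := h2.symm
      _ = PySem.Int.bor (x * 2 ^ (k + 1)) (y * 2 ^ (k + 1)) := by ring_nf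

-- the "placement" value: item j of r contributes r[j] * 2^(j*s)
def qpack (s : ℕ) : List Int → Int
  | [] => 0
  | x :: r => PySem.Int.bor x (qpack s r * 2 ^ s)

lemma qpack_append_single (s : ℕ) (r : List Int) (x : Int) :
    qpack s (r ++ [x]) = PySem.Int.bor (qpack s r) (x * 2 ^ (r.length * s)) := by
  induction r with
  | nil => simp [qpack, PySem.Int.bor_zero, zero_bor]
  | cons y r ih =>
    simp only [List.cons_append, qpack, ih, List.length_cons]
    rw [bor_mul_pow, bor_assoc]
    congr 2
    ring

-- A's loop: fold over enumerate(r, k) of OR-placements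
lemma foldA_eq (s : ℕ) (r : List Int) (k : ℕ) (acc : Int) :
    (PySem.List.enumerate r (k : Int)).foldl
      (fun (buffer : Int) (p : Int × Int) => PySem.Int.bor (p.2 <<< (p.1 * (s : Int)).toNat) buffer) acc
    = PySem.Int.bor (qpack s r * 2 ^ (k * s)) acc := by
  induction r generalizing k acc with
  | nil => simp [PySem.List.enumerate_nil, qpack, zero_bor]
  | cons x r ih =>
    simp only [PySem.List.enumerate_cons, List.foldl_cons]
    have hk1 : ((k : Int) + 1) = ((k + 1 : ℕ) : Int) := by push_cast; ring
    rw [hk1, ih]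
    have hsh : ((k : Int) * (s : Int)).toNat = k * s := by
      rw [← Int.natCast_mul, Int.toNat_natCast]
    rw [hsh, Int.shiftLeft_eq]
    simp only [qpack]
    rw [bor_mul_pow, bor_assoc, bor_left_comm]
    congr 2
    ring

-- B's loop: forward Horner accumulation
lemma foldB_eq (s : ℕ) (l : List Int) (acc : Int) :
    l.foldl (fun (buffer item : Int) => PySem.Int.bor (buffer <<< s) item) acc
    = PySem.Int.bor (acc * 2 ^ (l.length * s)) (qpack s l.reverse) := by
  induction l generalizing acc with
  | nil => simp [qpack, PySem.Int.bor_zero]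
  | cons x t ih =>
    rw [List.foldl_cons, ih]
    simp only [List.reverse_cons, List.length_cons, qpack_append_single,
      List.length_reverse]
    rw [Int.shiftLeft_eq, bor_mul_pow, bor_assoc]
    rw [PySem.Int.bor_comm (x * 2 ^ (t.length * s))]
    congr 1
    ring

-- ===== VERDICT (by name: the statement is the Claim_ definition above) =====
theorem encode_batch_spec : Claim_equal_encode_batch := by
  intro batch size hdom hpre
  unfold Spec_encode_batch
  obtain ⟨hsz, hne, hfit⟩ := hpre
  have hsnn : 0 ≤ size := by
    simp only [List.mem_cons, List.not_mem_nil, or_false] at hsz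
    rcases hsz with rfl|rfl|rfl|rfl|rfl|rfl|rfl|rfl|rfl <;> norm_num
  set s : ℕ := size.toNat with hs
  have hsize : size = (s : Int) := (Int.toNat_of_nonneg hsnn).symm
  unfold encode_batch encode_batch_alt
  simp only [PySem.List.slice?_none_none_neg_one, Option.getD_some]
  rw [hsize]
  simp only [Int.toNat_natCast]
  have hA := foldA_eq s batch.reverse 0 0
  simp only [Nat.cast_zero, Nat.zero_mul, pow_zero, mul_one, PySem.Int.bor_zero] at hA
  have hB := foldB_eq s batch 0
  rw [zero_mul, zero_bor] at hB
  rw [hA, hB]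
  have hsel : (((batch.length : Int) - 1 + 1) * (s : Int) +
      (28 - (batch.length : Int) * (s : Int))) = 28 := by ring
  rw [hsel]
  have h28 : (28 : Int).toNat = 28 := rfl
  rw [h28]
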